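-- pv_equiv track=rewrite | github.com/CryptoSalamander/Problem_Solving | Programmers/42840.py | solution
-- ===== SOURCE A (Python) =====
-- def solution(answers):
--     answer = []
--     a = [1,2,3,4,5] # 5
--     b = [2,1,2,3,2,4,2,5] # 8
--     c = [3,3,1,1,2,2,4,4,5,5] # 10
--     corr = [-9999, 0,0,0]
--     for idx,i in enumerate(answers):
--         if i == a[idx%5]:
--             corr[1] += 1
--         if i == b[idx%8]:
--             corr[2] += 1
--         if i == c[idx%10]:
--             corr[3] += 1
--     for i in range(1,4):
--         if corr[i] == max(corr):
--             answer.append(i)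
--     return answer
-- ===== SOURCE B (Python) =====
-- def solution(answers):
--     pats = [[1, 2, 3, 4, 5],
--             [2, 1, 2, 3, 2, 4, 2, 5],
--             [3, 3, 1, 1, 2, 2, 4, 4, 5, 5]]
--     scores = []
--     for pat in pats:
--         total = 0
--         for start in range(0, len(answers), len(pat)):
--             chunk = answers[start:start + len(pat)]
--             total += sum(u == v for u, v in zip(chunk, pat))
--         scores.append(total)
--     best = max(scores)
--     return [i for i in (1, 2, 3) if scores[i - 1] == best]
-- ===== Notes on version B (the rewrite author's own statement) =====
-- stated objective: alternative
-- what changed: Replaces A's single interleaved per-element loop with modular indexing into a sentinel-padded corr list by a block-wise scheme: answers is cut into pattern-length chunks and each chunk is compared positionally to the pattern via zip (no index arithmetic, no enumerate, no sentinel), then max/argmax over the three real scores.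
import Mathlib
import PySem

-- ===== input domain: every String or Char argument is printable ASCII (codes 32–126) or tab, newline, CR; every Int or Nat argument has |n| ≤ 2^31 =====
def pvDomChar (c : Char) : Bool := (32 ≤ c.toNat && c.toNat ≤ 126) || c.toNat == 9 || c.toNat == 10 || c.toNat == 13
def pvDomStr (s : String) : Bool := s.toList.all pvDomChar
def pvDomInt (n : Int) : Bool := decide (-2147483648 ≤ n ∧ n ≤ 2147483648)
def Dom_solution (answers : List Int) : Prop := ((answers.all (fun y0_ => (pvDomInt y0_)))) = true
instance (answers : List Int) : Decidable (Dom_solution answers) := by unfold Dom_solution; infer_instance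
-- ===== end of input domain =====

-- B replaces A's interleaved per-element loop with modular indexing into a sentinel-padded corr
-- list by block-wise scanning: answers is cut into pattern-length chunks compared to the pattern
-- via zip, then max/argmax over the three real scores (alternative decomposition, same cost).


-- ===== PORT A =====
def solution (answers : List Int) : List Int :=
  let a : List Int := [1,2,3,4,5] -- 5
  let b : List Int := [2,1,2,3,2,4,2,5] -- 8
  let c : List Int := [3,3,1,1,2,2,4,4,5,5] -- 10
  let corr : List Int :=
    (PySem.List.enumerate answers).foldl (fun corr p =>
      let corr := if p.2 = PySem.List.pyGetD a (PySem.Int.mod p.1 5) 0 then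
                    corr.set 1 (PySem.List.pyGetD corr 1 0 + 1) else corr
      let corr := if p.2 = PySem.List.pyGetD b (PySem.Int.mod p.1 8) 0 then
                    corr.set 2 (PySem.List.pyGetD corr 2 0 + 1) else corr
      let corr := if p.2 = PySem.List.pyGetD c (PySem.Int.mod p.1 10) 0 then
                    corr.set 3 (PySem.List.pyGetD corr 3 0 + 1) else corr
      corr) ([-9999, 0, 0, 0] : List Int)
  (PySem.List.pyRange 1 4 1).foldl (fun answer i =>
    if PySem.List.pyGetD corr i 0 = (PySem.List.max? corr (fun y => y)).getD 0 then
      answer ++ [i] else answer) []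

-- ===== PORT B =====
-- sum(u == v for u, v in zip(chunk, pat))
def pvZipMatches (chunk pat : List Int) : Int :=
  ((chunk.zip pat).map (fun p => if p.1 = p.2 then (1 : Int) else 0)).sum

-- the inner 'for start in range(0, len(answers), len(pat))' loop of Source B
def pvChunkScore (pat answers : List Int) : Int :=
  (PySem.List.pyRange 0 (answers.length : Int) (pat.length : Int)).foldl
    (fun total start =>
      total + pvZipMatches (PySem.List.slice answers (some start) (some (start + (pat.length : Int)))) pat) 0

def solution_alt (answers : List Int) : List Int :=
  let pats : List (List Int) := [[1,2,3,4,5],[2,1,2,3,2,4,2,5],[3,3,1,1,2,2,4,4,5,5]]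
  let scores : List Int := pats.foldl (fun acc pat => acc ++ [pvChunkScore pat answers]) []
  let best : Int := (PySem.List.max? scores (fun y => y)).getD 0
  ([1,2,3] : List Int).filter (fun i => PySem.List.pyGetD scores (i - 1) 0 = best)

-- ===== PRECONDITION & SPEC =====
def Spec_solution (answers : List Int) (out : List Int) : Prop := out = solution_alt answers
instance (answers : List Int) (out : List Int) : Decidable (Spec_solution answers out) := by unfold Spec_solution; infer_instance

-- ===== CLAIM (what is proved, stated in full; the proofs are below) =====
def Claim_equal_solution : Prop := ∀ (answers : List Int), Dom_solution answers → Spec_solution answers (solution answers)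

-- ===== LEMMAS AND PROOFS =====
-- per-element cyclic score, the common yardstick both ports are reduced to
def pvSF (pat : List Int) : List Int → Int → Int
  | [], _ => 0
  | x :: xs, s =>
      (if x = PySem.List.pyGetD pat (PySem.Int.mod s (pat.length : Int)) 0 then 1 else 0)
        + pvSF pat xs (s + 1)

theorem pvSF_nonneg (pat xs : List Int) (s : Int) : 0 ≤ pvSF pat xs s := by
  induction xs generalizing s with
  | nil => simp [pvSF]
  | cons x xs ih =>
    have := ih (s + 1)
    by_cases h : x = PySem.List.pyGetD pat (PySem.Int.mod s (pat.length : Int)) 0 <;>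
      simp [pvSF, h] <;> omega

theorem pvFoldA (answers : List Int) (s x1 x2 x3 : Int) :
    (PySem.List.enumerate answers s).foldl (fun corr p =>
      let corr := if p.2 = PySem.List.pyGetD [1,2,3,4,5] (PySem.Int.mod p.1 5) 0 then
                    corr.set 1 (PySem.List.pyGetD corr 1 0 + 1) else corr
      let corr := if p.2 = PySem.List.pyGetD [2,1,2,3,2,4,2,5] (PySem.Int.mod p.1 8) 0 then
                    corr.set 2 (PySem.List.pyGetD corr 2 0 + 1) else corr
      let corr := if p.2 = PySem.List.pyGetD [3,3,1,1,2,2,4,4,5,5] (PySem.Int.mod p.1 10) 0 then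
                    corr.set 3 (PySem.List.pyGetD corr 3 0 + 1) else corr
      corr) ([-9999, x1, x2, x3] : List Int)
    = [-9999, x1 + pvSF [1,2,3,4,5] answers s,
       x2 + pvSF [2,1,2,3,2,4,2,5] answers s,
       x3 + pvSF [3,3,1,1,2,2,4,4,5,5] answers s] := by
  induction answers generalizing s x1 x2 x3 with
  | nil => simp [PySem.List.enumerate_nil, pvSF]
  | cons hd tl ih =>
    rw [PySem.List.enumerate_cons]
    set f := (fun (corr : List Int) (p : Int × Int) =>
      let corr := if p.2 = PySem.List.pyGetD [1,2,3,4,5] (PySem.Int.mod p.1 5) 0 then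
                    corr.set 1 (PySem.List.pyGetD corr 1 0 + 1) else corr
      let corr := if p.2 = PySem.List.pyGetD [2,1,2,3,2,4,2,5] (PySem.Int.mod p.1 8) 0 then
                    corr.set 2 (PySem.List.pyGetD corr 2 0 + 1) else corr
      let corr := if p.2 = PySem.List.pyGetD [3,3,1,1,2,2,4,4,5,5] (PySem.Int.mod p.1 10) 0 then
                    corr.set 3 (PySem.List.pyGetD corr 3 0 + 1) else corr
      corr) with hf
    rw [List.foldl_cons]
    have hstep : f [-9999, x1, x2, x3] (s, hd)
      = [-9999,
         x1 + (if hd = PySem.List.pyGetD [1,2,3,4,5] (PySem.Int.mod s 5) 0 then 1 else 0),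
         x2 + (if hd = PySem.List.pyGetD [2,1,2,3,2,4,2,5] (PySem.Int.mod s 8) 0 then 1 else 0),
         x3 + (if hd = PySem.List.pyGetD [3,3,1,1,2,2,4,4,5,5] (PySem.Int.mod s 10) 0 then 1 else 0)] := by
      rw [hf]
      simp only []
      show (let corr := if hd = PySem.List.pyGetD [1,2,3,4,5] (PySem.Int.mod s 5) 0 then
                    ([-9999, x1, x2, x3]:List Int).set 1 (PySem.List.pyGetD [-9999, x1, x2, x3] 1 0 + 1) else [-9999, x1, x2, x3];
        let corr := if hd = PySem.List.pyGetD [2,1,2,3,2,4,2,5] (PySem.Int.mod s 8) 0 then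
                    corr.set 2 (PySem.List.pyGetD corr 2 0 + 1) else corr;
        let corr := if hd = PySem.List.pyGetD [3,3,1,1,2,2,4,4,5,5] (PySem.Int.mod s 10) 0 then
                    corr.set 3 (PySem.List.pyGetD corr 3 0 + 1) else corr;
        corr) = _
      split_ifs <;> simp [PySem.List.pyGetD, PySem.List.pyGet?, PySem.List.pyIdx?, List.set]
    rw [hstep, ih]
    show _ = [(-9999 : Int),
      x1 + pvSF [1,2,3,4,5] (hd :: tl) s,
      x2 + pvSF [2,1,2,3,2,4,2,5] (hd :: tl) s,
      x3 + pvSF [3,3,1,1,2,2,4,4,5,5] (hd :: tl) s]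
    simp only [pvSF, List.length_cons, List.length_nil]
    norm_num
    refine ⟨by ring, by ring, by ring⟩

-- shift the phase by one full pattern length
theorem pvSF_shift (pat xs : List Int) (s : Int) (hk : 0 < pat.length) :
    pvSF pat xs (s + (pat.length : Int)) = pvSF pat xs s := by
  induction xs generalizing s with
  | nil => rfl
  | cons x xs ih =>
    have hK : (0:Int) < (pat.length : Int) := by exact_mod_cast hk
    have hmod : PySem.Int.mod (s + (pat.length : Int)) (pat.length : Int)
        = PySem.Int.mod s (pat.length : Int) := by
      rw [PySem.Int.mod_eq_emod_of_pos hK, PySem.Int.mod_eq_emod_of_pos hK,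
          show s + (pat.length : Int) = s + (pat.length : Int) * 1 by ring,
          Int.add_mul_emod_self_left]
    show (if x = PySem.List.pyGetD pat (PySem.Int.mod (s + (pat.length : Int)) (pat.length : Int)) 0 then (1:Int) else 0)
        + pvSF pat xs (s + (pat.length : Int) + 1) = _
    rw [hmod, show s + (pat.length : Int) + 1 = (s + 1) + (pat.length : Int) by ring, ih]
    rfl

theorem pvSF_append (pat ys zs : List Int) (s : Int) :
    pvSF pat (ys ++ zs) s = pvSF pat ys s + pvSF pat zs (s + (ys.length : Int)) := by
  induction ys generalizing s with
  | nil => simp [pvSF]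
  | cons y ys ih =>
    show (if y = _ then (1:Int) else 0) + pvSF pat (ys ++ zs) (s + 1) = _
    rw [ih]
    simp only [pvSF, List.length_cons]
    push_cast
    ring

-- a short block compared positionally: pvSF at offset j equals a zip count against pat.drop j
theorem pvSF_zip (pat : List Int) (xs : List Int) (j : Nat)
    (hlen : j + xs.length ≤ pat.length) :
    pvSF pat xs (j : Int) = pvZipMatches xs (pat.drop j) := by
  induction xs generalizing j with
  | nil => simp [pvSF, pvZipMatches]
  | cons x xs ih =>
    have hj : j < pat.length := by simp at hlen; omega
    have hmod : PySem.Int.mod (j : Int) (pat.length : Int) = (j : Int) := by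
      rw [PySem.Int.mod_natCast]
      norm_num [Nat.mod_eq_of_lt hj]
    have hget : PySem.List.pyGetD pat (j : Int) 0 = pat[j] := by
      rw [PySem.List.pyGetD_natCast]
      simp [List.getD, hj]
    have hdrop : pat.drop j = pat[j] :: pat.drop (j + 1) :=
      List.drop_eq_getElem_cons hj
    show (if x = PySem.List.pyGetD pat (PySem.Int.mod (j:Int) (pat.length : Int)) 0 then (1:Int) else 0)
        + pvSF pat xs ((j:Int) + 1) = _
    rw [hmod, hget]
    have hcast : ((j : Int) + 1) = ((j + 1 : Nat) : Int) := by push_cast; ring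
    rw [hcast, ih (j + 1) (by simp at hlen ⊢; omega)]
    have hzm : pvZipMatches (x :: xs) (pat.drop j)
        = (if x = pat[j] then (1:Int) else 0) + pvZipMatches xs (pat.drop (j + 1)) := by
      unfold pvZipMatches
      rw [hdrop, List.zip_cons_cons, List.map_cons, List.sum_cons]
    rw [hzm]

-- zip truncates: only the first pat.length elements of the chunk matter
theorem pvZipTake (xs ys : List Int) : (xs.take ys.length).zip ys = xs.zip ys := by
  induction xs generalizing ys with
  | nil => simp
  | cons x xs ih =>
    cases ys with
    | nil => simp
    | cons y ys => simp [ih]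

theorem pvZipMatches_take (xs pat : List Int) :
    pvZipMatches (xs.take pat.length) pat = pvZipMatches xs pat := by
  unfold pvZipMatches
  rw [pvZipTake]

theorem pvSF_chunk (pat xs : List Int) (hk : 0 < pat.length) :
    pvSF pat xs 0 = pvZipMatches xs pat + pvSF pat (xs.drop pat.length) 0 := by
  conv_lhs => rw [← List.take_append_drop pat.length xs]
  rw [pvSF_append]
  have h0 : pvSF pat (xs.take pat.length) 0 = pvZipMatches xs pat := by
    have := pvSF_zip pat (xs.take pat.length) 0 (by simp)
    simpa [pvZipMatches_take] using this
  rw [h0]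
  by_cases hle : xs.length ≤ pat.length
  · simp [List.drop_eq_nil_of_le hle, pvSF]
  · have hlen : (xs.take pat.length).length = pat.length := by
      simp; omega
    rw [hlen]
    rw [show (0 : Int) + (pat.length : Int) = 0 + (pat.length : Int) by ring]
    rw [pvSF_shift pat _ 0 hk]

-- summing zip-matches over c chunks of width K covers xs once
theorem pvSumChunks (pat : List Int) (hk : 0 < pat.length) :
    ∀ (c : Nat) (xs : List Int), xs.length ≤ c * pat.length →
      ((List.range c).map (fun j => pvZipMatches ((xs.drop (pat.length * j)).take pat.length) pat)).sum
        = pvSF pat xs 0 := by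
  intro c
  induction c with
  | zero =>
    intro xs h
    have : xs = [] := by
      cases xs with
      | nil => rfl
      | cons a l => simp at h
    subst this; simp [pvSF]
  | succ c ih =>
    intro xs h
    have hmul : (c + 1) * pat.length = c * pat.length + pat.length := by
      rw [Nat.succ_mul]
    rw [List.range_succ_eq_map]
    simp only [List.map_cons, List.map_map, List.sum_cons, Nat.mul_zero, List.drop_zero]
    have hmap : ((List.range c).map
        ((fun j => pvZipMatches ((xs.drop (pat.length * j)).take pat.length) pat) ∘ (fun x => x + 1))).sum
        = pvSF pat (xs.drop pat.length) 0 := by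
      rw [← ih (xs.drop pat.length) (by simp; omega)]
      congr 1
      apply List.map_congr_left
      intro j _
      simp only [Function.comp]
      rw [List.drop_drop]
      congr 2
      ring
    rw [hmap, pvSF_chunk pat xs hk, pvZipMatches_take]

theorem pvChunkScore_eq (pat xs : List Int) (hk : 0 < pat.length) :
    pvChunkScore pat xs = pvSF pat xs 0 := by
  unfold pvChunkScore
  rw [PySem.List.foldl_add]
  rw [PySem.List.pyRange_of_pos _ _ (by exact_mod_cast hk)]
  rw [List.map_map]
  set K := pat.length with hK
  set c : Nat := if (0:Int) < (xs.length : Int) then (((xs.length : Int) - 0 + K - 1) / K).toNat else 0 with hc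
  have hslice : ∀ j : Nat,
      PySem.List.slice xs (some ((K:Int) * (j:Int))) (some ((K:Int) * (j:Int) + (K:Int)))
        = (xs.drop (K * j)).take K := by
    intro j
    have h1 : ((K:Int) * (j:Int)) = ((K * j : Nat) : Int) := by push_cast; ring
    rw [h1, PySem.List.slice_natCast_add]
  have hcov : xs.length ≤ c * K := by
    rw [hc]
    by_cases hx : (0:Int) < (xs.length : Int)
    · simp only [if_pos hx]
      have hK' : (0:Int) < (K:Int) := by exact_mod_cast hk
      have hdiv := Int.emod_add_mul_ediv ((xs.length : Int) - 0 + K - 1) K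
      have hmod1 := Int.emod_nonneg ((xs.length : Int) - 0 + K - 1) (by omega : (K:Int) ≠ 0)
      have hmod2 := Int.emod_lt_of_pos ((xs.length : Int) - 0 + K - 1) hK'
      have hq : 0 ≤ ((xs.length : Int) - 0 + K - 1) / K := by
        apply Int.ediv_nonneg <;> omega
      have : ((((xs.length : Int) - 0 + K - 1) / K).toNat : Int) * K ≥ (xs.length : Int) := by
        rw [Int.toNat_of_nonneg hq]
        nlinarith [hdiv, hmod1, hmod2]
      zify
      rw [Int.toNat_of_nonneg hq] at this ⊢
      omega
    · simp only [if_neg hx]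
      simp at hx ⊢
      omega
  have := pvSumChunks pat hk c xs hcov
  rw [← this]
  simp only [Int.zero_add]
  congr 1
  apply List.map_congr_left
  intro j _
  simp only [Function.comp]
  rw [hslice j]

-- ===== VERDICT (by name: the statement is the Claim_ definition above) =====
set_option maxRecDepth 8192 in
theorem solution_spec : Claim_equal_solution := by
  intro answers _
  unfold Spec_solution solution solution_alt
  simp only []
  rw [pvFoldA]
  rw [show ([[1,2,3,4,5],[2,1,2,3,2,4,2,5],[3,3,1,1,2,2,4,4,5,5]] : List (List Int)).foldl
        (fun acc pat => acc ++ [pvChunkScore pat answers]) []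
      = [pvChunkScore [1,2,3,4,5] answers, pvChunkScore [2,1,2,3,2,4,2,5] answers,
         pvChunkScore [3,3,1,1,2,2,4,4,5,5] answers] from by
    simp [List.foldl]]
  rw [pvChunkScore_eq _ _ (by decide), pvChunkScore_eq _ _ (by decide),
      pvChunkScore_eq _ _ (by decide)]
  have h1 := pvSF_nonneg [1,2,3,4,5] answers 0
  have h2 := pvSF_nonneg [2,1,2,3,2,4,2,5] answers 0
  have h3 := pvSF_nonneg [3,3,1,1,2,2,4,4,5,5] answers 0
  set S1 := pvSF [1,2,3,4,5] answers 0 with hS1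
  set S2 := pvSF [2,1,2,3,2,4,2,5] answers 0 with hS2
  set S3 := pvSF [3,3,1,1,2,2,4,4,5,5] answers 0 with hS3
  rw [show PySem.List.pyRange 1 4 1 = [1,2,3] from by decide]
  rw [PySem.List.max?_id_cons, PySem.List.max?_id_cons]
  simp only [List.foldl_cons, List.foldl_nil, Option.getD_some]
  have hmax : max (-9999 : Int) (0 + S1) = 0 + S1 := max_eq_right (by omega)
  simp only [hmax]
  simp [List.filter_cons, PySem.List.pyGetD, PySem.List.pyGet?, PySem.List.pyIdx?]
  split_ifs <;> simp
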